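-- pv_equiv track=rewrite | github.com/l-Damon-l/advent-of-code-2021 | Python/Day 10/day10.py | new_list_without_error_strings
-- ===== SOURCE A (Python) =====
-- def new_list_without_error_strings(string_list: list[str], unwanted_indexes: list[int]):
--     new_list = []
--     for i in range(0, len(string_list)):
--         if i in unwanted_indexes:
--             pass
--         else:
--             new_list.append(string_list[i])
--     return new_list
-- ===== SOURCE B (Python) =====
-- def new_list_without_error_strings(string_list: list[str], unwanted_indexes: list[int]):
--     n = len(string_list)
--     cuts = sorted({i for i in unwanted_indexes if 0 <= i < n})
--     out = []
--     prev = 0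
--     for c in cuts:
--         out += string_list[prev:c]
--         prev = c + 1
--     out += string_list[prev:]
--     return out
-- ===== Notes on version B (the rewrite author's own statement) =====
-- stated objective: faster
-- what changed: Instead of scanning every index with a membership test, B sorts the deduplicated in-range unwanted indexes into cut points and concatenates the slices of string_list between consecutive cut points.
import Mathlib
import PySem

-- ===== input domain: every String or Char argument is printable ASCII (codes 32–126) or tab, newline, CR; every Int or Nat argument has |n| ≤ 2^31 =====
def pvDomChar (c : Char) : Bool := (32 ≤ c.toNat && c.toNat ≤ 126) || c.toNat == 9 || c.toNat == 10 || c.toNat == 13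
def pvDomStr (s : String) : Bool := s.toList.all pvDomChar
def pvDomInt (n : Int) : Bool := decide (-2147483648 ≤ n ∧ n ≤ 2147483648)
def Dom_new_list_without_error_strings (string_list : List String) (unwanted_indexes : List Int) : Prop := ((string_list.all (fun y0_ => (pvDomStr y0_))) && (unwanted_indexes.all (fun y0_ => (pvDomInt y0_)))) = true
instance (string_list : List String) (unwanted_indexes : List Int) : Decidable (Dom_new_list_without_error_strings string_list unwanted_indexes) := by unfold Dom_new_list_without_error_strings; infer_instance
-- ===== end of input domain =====

-- B replaces A's per-index membership scan by sorting the deduplicated in-range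
-- unwanted indexes into cut points and concatenating the slices between them (faster).


-- ===== PORT A =====
-- for i in range(0, len(string_list)): if i in unwanted_indexes: pass else: append string_list[i]
-- (string_list[i] ported as pyGetD with dummy default: i is always in range here)
def new_list_without_error_strings (string_list : List String) (unwanted_indexes : List Int) : List String :=
  (PySem.List.pyRange 0 (PySem.List.len string_list) 1).foldl
    (fun new_list i =>
      if i ∈ unwanted_indexes then new_list
      else new_list ++ [PySem.List.pyGetD string_list i ""])
    []

-- ===== PORT B =====
-- n = len; cuts = sorted({i for i in unwanted if 0 <= i < n});
-- out = []; prev = 0; for c in cuts: out += string_list[prev:c]; prev = c+1; out += string_list[prev:]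
def new_list_without_error_strings_alt (string_list : List String) (unwanted_indexes : List Int) : List String :=
  let n : Int := PySem.List.len string_list
  let cuts := PySem.List.sorted
    (PySem.Set.ofList (unwanted_indexes.filter (fun i => decide (0 ≤ i) && decide (i < n))))
    (fun x => x) false
  let r := cuts.foldl
    (fun (p : List String × Int) c => (p.1 ++ PySem.List.slice string_list (some p.2) (some c), c + 1))
    ([], 0)
  r.1 ++ PySem.List.slice string_list (some r.2) none

-- ===== PRECONDITION & SPEC =====
def Spec_new_list_without_error_strings (string_list : List String) (unwanted_indexes : List Int) (out : List String) : Prop := out = new_list_without_error_strings_alt string_list unwanted_indexes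
instance (string_list : List String) (unwanted_indexes : List Int) (out : List String) : Decidable (Spec_new_list_without_error_strings string_list unwanted_indexes out) := by unfold Spec_new_list_without_error_strings; infer_instance

-- ===== CLAIM (what is proved, stated in full; the proofs are below) =====
def Claim_equal_new_list_without_error_strings : Prop := ∀ (string_list : List String) (unwanted_indexes : List Int), Dom_new_list_without_error_strings string_list unwanted_indexes → Spec_new_list_without_error_strings string_list unwanted_indexes (new_list_without_error_strings string_list unwanted_indexes)

-- ===== LEMMAS AND PROOFS =====

-- A's loop is: filter the index range by non-membership, then index.
theorem pvA_eq (sl : List String) (ui : List Int) :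
    new_list_without_error_strings sl ui
      = ((PySem.List.pyRange 0 (PySem.List.len sl) 1).filter (fun k => !decide (k ∈ ui))).map
          (fun k => PySem.List.pyGetD sl k "") := by
  unfold new_list_without_error_strings
  have hbody : ∀ (nl : List String) (i : Int),
      (if i ∈ ui then nl else nl ++ [PySem.List.pyGetD sl i ""])
        = (if (!decide (i ∈ ui)) = true then nl ++ [PySem.List.pyGetD sl i ""] else nl) := by
    intro nl i; by_cases h : i ∈ ui <;> simp [h]
  simp only [hbody]
  rw [PySem.List.foldl_append_if (fun i => !decide (i ∈ ui)) (fun i => PySem.List.pyGetD sl i "") _ []]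
  simp

-- A slice with in-range bounds is the mapped index range.
theorem pvSlice_eq_map (sl : List String) (a b : Int) (h0 : 0 ≤ a) (hab : a ≤ b)
    (hb : b ≤ (sl.length : Int)) :
    PySem.List.slice sl (some a) (some b)
      = (PySem.List.pyRange a b 1).map (fun j => PySem.List.pyGetD sl j "") := by
  rw [PySem.List.slice_toNat sl h0 (by omega)]
  apply List.ext_getElem
  · simp [PySem.List.length_pyRange_one]; omega
  · intro k hk hk'
    have hk2 : a.toNat + k < sl.length := by
      simp [PySem.List.length_pyRange_one] at hk'; omega
    rw [List.getElem_take, List.getElem_drop, List.getElem_map,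
        PySem.List.getElem_pyRange_one,
        PySem.List.pyGetD_eq_getElem sl "" (by omega) (by omega)]
    congr 1; omega

-- The cut-point loop: with sorted in-range cuts, slices between cuts concatenate to
-- the filtered-index selection.
theorem pvCuts_fold (sl : List String) (cuts : List Int) :
    ∀ (prev : Int) (out : List String), 0 ≤ prev →
    (∀ c ∈ cuts, prev ≤ c ∧ c < (sl.length : Int)) →
    cuts.Pairwise (· < ·) →
    (let r := cuts.foldl
        (fun (p : List String × Int) c => (p.1 ++ PySem.List.slice sl (some p.2) (some c), c + 1))
        (out, prev)
     r.1 ++ PySem.List.slice sl (some r.2) none)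
      = out ++ ((PySem.List.pyRange prev (sl.length : Int) 1).filter
          (fun k => !decide (k ∈ cuts))).map (fun k => PySem.List.pyGetD sl k "") := by
  induction cuts with
  | nil =>
      intro prev out h0 _ _
      simp only [List.foldl_nil]
      rw [PySem.List.slice_from sl h0]
      have hmr := PySem.List.map_pyGetD_pyRange' sl "" h0
      have hfil : (PySem.List.pyRange prev (sl.length : Int) 1).filter
          (fun k => !decide (k ∈ ([] : List Int))) = PySem.List.pyRange prev (sl.length : Int) 1 := by
        apply List.filter_eq_self.mpr; intro k _; simp
      rw [hfil, hmr]
  | cons c rest ih =>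
      intro prev out h0 hmem hpw
      have hc := hmem c (by simp)
      have hrest : ∀ x ∈ rest, c + 1 ≤ x ∧ x < (sl.length : Int) := by
        intro x hx
        exact ⟨by have := (List.pairwise_cons.mp hpw).1 x hx; omega, (hmem x (by simp [hx])).2⟩
      simp only [List.foldl_cons]
      rw [ih (c + 1) (out ++ PySem.List.slice sl (some prev) (some c)) (by omega) hrest
        (List.pairwise_cons.mp hpw).2]
      rw [pvSlice_eq_map sl prev c h0 hc.1 (by omega)]
      -- split the range prev..n at c and c+1
      rw [PySem.List.pyRange_one_append prev c (sl.length : Int) hc.1 (by omega),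
          PySem.List.pyRange_one_cons (a := c) (by omega)]
      simp only [List.filter_append, List.filter_cons, List.map_append, List.append_assoc]
      have h1 : (PySem.List.pyRange prev c 1).filter (fun k => !decide (k ∈ c :: rest))
          = PySem.List.pyRange prev c 1 := by
        apply List.filter_eq_self.mpr
        intro k hk
        have hk' := (PySem.List.mem_pyRange_one).mp hk
        have : k ∉ c :: rest := by
          simp only [List.mem_cons]
          rintro (rfl | hr)
          · omega
          · have := (hrest k hr).1; omega
        simp [this]
      have h2 : (!decide (c ∈ c :: rest)) = false := by simp
      have h3 : (PySem.List.pyRange (c+1) (sl.length : Int) 1).filter (fun k => !decide (k ∈ c :: rest))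
          = (PySem.List.pyRange (c+1) (sl.length : Int) 1).filter (fun k => !decide (k ∈ rest)) := by
        apply List.filter_congr
        intro k hk
        have hk' := (PySem.List.mem_pyRange_one).mp hk
        have : (k ∈ c :: rest) ↔ (k ∈ rest) := by
          simp only [List.mem_cons, or_iff_right_iff_imp]
          intro h; omega
        simp [this]
      rw [h1, h2, h3]
      simp

-- ===== VERDICT (by name: the statement is the Claim_ definition above) =====
theorem new_list_without_error_strings_spec : Claim_equal_new_list_without_error_strings := by
  intro sl ui _
  unfold Spec_new_list_without_error_strings
  rw [pvA_eq]
  have hlen : PySem.List.len sl = (sl.length : Int) := PySem.List.len_eq sl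
  have halt : new_list_without_error_strings_alt sl ui
      = ((PySem.List.sorted (PySem.Set.ofList (ui.filter (fun i => decide (0 ≤ i) && decide (i < PySem.List.len sl)))) (fun x => x) false).foldl
            (fun (p : List String × Int) c => (p.1 ++ PySem.List.slice sl (some p.2) (some c), c + 1)) ([], 0)).1
          ++ PySem.List.slice sl
              (some (((PySem.List.sorted (PySem.Set.ofList (ui.filter (fun i => decide (0 ≤ i) && decide (i < PySem.List.len sl)))) (fun x => x) false).foldl
                (fun (p : List String × Int) c => (p.1 ++ PySem.List.slice sl (some p.2) (some c), c + 1)) ([], 0)).2)) none := rfl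
  rw [halt]
  set cuts := PySem.List.sorted
    (PySem.Set.ofList (ui.filter (fun i => decide (0 ≤ i) && decide (i < PySem.List.len sl))))
    (fun x => x) false with hcuts
  have hpw : cuts.Pairwise (· < ·) := PySem.List.sorted_ofList_pairwise_lt _
  have hmem_cuts : ∀ k : Int, k ∈ cuts ↔ (0 ≤ k ∧ k < (sl.length : Int) ∧ k ∈ ui) := by
    intro k
    rw [hcuts, PySem.List.mem_sorted, PySem.Set.mem_ofList, List.mem_filter, hlen]
    constructor
    · rintro ⟨h1, h2⟩
      simp only [Bool.and_eq_true, decide_eq_true_eq] at h2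
      exact ⟨h2.1, h2.2, h1⟩
    · rintro ⟨h1, h2, h3⟩
      exact ⟨h3, by simp [h1, h2]⟩
  have hdom : ∀ c ∈ cuts, (0:Int) ≤ c ∧ c < (sl.length : Int) := by
    intro c hc; have := (hmem_cuts c).mp hc; exact ⟨this.1, this.2.1⟩
  have key := pvCuts_fold sl cuts 0 [] le_rfl hdom hpw
  simp only [List.nil_append] at key
  rw [hlen, key]
  apply congrArg
  apply List.filter_congr
  intro k hk
  have hk2 := (PySem.List.mem_pyRange_one).mp hk
  have hiff : (k ∈ ui) ↔ (k ∈ cuts) := by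
    rw [hmem_cuts]
    exact ⟨fun h => ⟨hk2.1, hk2.2, h⟩, fun h => h.2.2⟩
  simp [hiff]
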